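-- pv_equiv track=rewrite | github.com/pedropelaes/Projeto_Integrador_24 | projeto_integrador.py | criptografia
-- ===== SOURCE A (Python) =====
-- def criptografia(descrição):
--     descricao_criptografada=""
--
--     alfabeto = {
--         "A": 1, "B": 2, "C": 3, "D": 4, "E": 5, "F": 6, "G": 7, "H": 8, "I": 9, "J": 10,
--         "K": 11, "L": 12, "M": 13, "N": 14, "O": 15, "P": 16, "Q": 17, "R": 18, "S": 19,
--         "T": 20, "U": 21, "V": 22, "W": 23, "X": 24, "Y": 25, " ":0, "Z": 26
--     }
--     #matriz codificadora
--     A=([4, 3],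
--        [1, 2])
--     l1=[]
--     l2=[]
--     cont=0 #variavel cont aumenta de 1 em 1 é usada no if para alternar as produtos em que se insere o valor das letras
--     for i in range(len(descrição)):
--         cont+=1
--         letra=descrição[i]
--         chave=letra
--         x=alfabeto[chave]
--         if cont % 2 != 0:
--             l1.append(x)
--         else:
--             l2.append(x)
--     if len(l2) < len(l1):
--         ultimoelemento=l1[len(l1)-1]
--         l2.append(ultimoelemento)
--     #matriz P da palavra a ser codificada
--     P=([l1,
--         l2])
--     #matriz codificada
--     c1=[]
--     c2=[]
--     for i in range(len(l1)):
--         x = (A[0][0] * l1[i]) + (A[0][1] * l2[i])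
--         c1.append(x)
--         y = (A[1][0] * l1[i]) + (A[1][1] * l2[i])
--         c2.append(y)
--     C=([c1,
--         c2])
--     #pmodulo(C,27)
--     C1=[]
--     C2=[]
--     for i in range(len(C[0])): #linha1 da matriz codificada
--         n = C[0][i]
--         if n >= 27:
--             n=n%27
--         C1.append(n)
--     for i in range(len(C[1])): #linha2 da matriz codificada
--         n= C[1][i]
--         if n>= 27:
--             n=n%27
--         C2.append(n)
--     #organização dos valores das silabas
--     silabas=[]
--     for i in range(len(C1)):
--         silabas.append(C1[i])
--         silabas.append(C2[i])
--     #busca no dicionário as chaves(letras) equivalentes aos valores da letras codificadas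
--     for i in range(len(silabas)):
--         valor=silabas[i]
--         for key, value in alfabeto.items():
--             if value == valor:
--                 descricao_criptografada += key
--     return(descricao_criptografada)
-- ===== SOURCE B (Python) =====
-- # Simpler one-pass re-implementation: an inverse table and a single loop over
-- # character pairs replaces the five split/encode/mod/interleave/lookup passes.
-- ALFABETO = {
--     "A": 1, "B": 2, "C": 3, "D": 4, "E": 5, "F": 6, "G": 7, "H": 8, "I": 9, "J": 10,
--     "K": 11, "L": 12, "M": 13, "N": 14, "O": 15, "P": 16, "Q": 17, "R": 18, "S": 19,
--     "T": 20, "U": 21, "V": 22, "W": 23, "X": 24, "Y": 25, " ": 0, "Z": 26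
-- }
-- INVERSO = {v: k for k, v in ALFABETO.items()}
--
-- def criptografia(descrição):
--     out = []
--     n = len(descrição)
--     for i in range(0, n, 2):
--         a = ALFABETO[descrição[i]]
--         b = ALFABETO[descrição[i + 1]] if i + 1 < n else a
--         out.append(INVERSO[(4 * a + 3 * b) % 27])
--         out.append(INVERSO[(a + 2 * b) % 27])
--     return "".join(out)
-- ===== Notes on version B (the rewrite author's own statement) =====
-- stated objective: simpler
-- what changed: Replaces A's five sequential passes (parity split into two lists, matrix multiply, conditional mod, interleave, and a per-value linear scan of the dict for the inverse lookup) with a precomputed inverse table and a single loop over character pairs that emits both output letters directly.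
import Mathlib
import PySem

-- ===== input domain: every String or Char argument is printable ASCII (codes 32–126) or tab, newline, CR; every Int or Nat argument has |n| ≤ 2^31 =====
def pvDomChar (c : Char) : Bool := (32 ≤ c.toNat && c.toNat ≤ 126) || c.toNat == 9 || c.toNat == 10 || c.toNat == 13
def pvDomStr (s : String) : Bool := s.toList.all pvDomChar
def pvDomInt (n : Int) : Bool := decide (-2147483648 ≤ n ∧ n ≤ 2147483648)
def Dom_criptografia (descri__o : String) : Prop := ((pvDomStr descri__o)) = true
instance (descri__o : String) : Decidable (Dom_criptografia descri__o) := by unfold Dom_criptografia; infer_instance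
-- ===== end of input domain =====

-- B fuses A's five passes (parity split, matrix product, mod, interleave, reverse lookup)
-- into one loop over character pairs with a precomputed inverse table; objective: simpler.

-- the alphabet dict both Pythons literally contain (Python keys are 1-char strings, modelled as Char)
def pvAlf : PySem.Dict Char Int := PySem.Dict.mk
  [('A',1),('B',2),('C',3),('D',4),('E',5),('F',6),('G',7),('H',8),('I',9),('J',10),
   ('K',11),('L',12),('M',13),('N',14),('O',15),('P',16),('Q',17),('R',18),('S',19),
   ('T',20),('U',21),('V',22),('W',23),('X',24),('Y',25),(' ',0),('Z',26)]

-- ===== PORT A =====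
-- literal transliteration; alfabeto[chave] is getD (the KeyError case is excluded by Pre_),
-- all other list indexings are in range by construction, so getD there is exact.
def criptografia (descri__o : String) : String :=
  let st := descri__o.toList.foldl
    (fun (st : Int × List Int × List Int) letra =>
      let cont := st.1 + 1
      let x := pvAlf.getD letra 0
      if PySem.Int.mod cont 2 ≠ 0 then (cont, st.2.1 ++ [x], st.2.2)
      else (cont, st.2.1, st.2.2 ++ [x]))
    (0, [], [])
  let l1 := st.2.1
  let l2 := if st.2.2.length < l1.length
            then st.2.2 ++ [l1.getD (l1.length - 1) 0] else st.2.2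
  let c1 := (List.range l1.length).map (fun i => 4 * l1.getD i 0 + 3 * l2.getD i 0)
  let c2 := (List.range l1.length).map (fun i => 1 * l1.getD i 0 + 2 * l2.getD i 0)
  let C1 := c1.map (fun n => if n ≥ 27 then PySem.Int.mod n 27 else n)
  let C2 := c2.map (fun n => if n ≥ 27 then PySem.Int.mod n 27 else n)
  let silabas := (List.range C1.length).foldl
    (fun acc i => acc ++ [C1.getD i 0, C2.getD i 0]) []
  silabas.foldl (fun acc valor =>
    pvAlf.items.foldl (fun acc2 kv => if kv.2 == valor then acc2.push kv.1 else acc2) acc) ""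

-- ===== PORT B =====
def pvInv : PySem.Dict Int Char := PySem.Dict.ofList (pvAlf.items.map (fun kv => (kv.2, kv.1)))

def pvEncPair (a b : Int) : List Char :=
  [pvInv.getD (PySem.Int.mod (4*a + 3*b) 27) ' ', pvInv.getD (PySem.Int.mod (a + 2*b) 27) ' ']

-- the stride-2 loop of Source B: one step per pair of characters
def pvGoB : List Char → List Char
  | [] => []
  | [c] => pvEncPair (pvAlf.getD c 0) (pvAlf.getD c 0)
  | c1 :: c2 :: rest => pvEncPair (pvAlf.getD c1 0) (pvAlf.getD c2 0) ++ pvGoB rest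

def criptografia_alt (descri__o : String) : String := String.ofList (pvGoB descri__o.toList)

-- ===== PRECONDITION & SPEC =====
-- Pre_ excludes exactly the inputs containing a character outside the alphabet dict
-- (anything but space or an uppercase letter), on which Python A raises KeyError.
def Pre_criptografia (descri__o : String) : Prop :=
  descri__o.toList.all (fun c => c == ' ' || (decide ('A' ≤ c) && decide (c ≤ 'Z'))) = true
instance (descri__o : String) : Decidable (Pre_criptografia descri__o) := by
  unfold Pre_criptografia; infer_instance
def pvWitness_criptografia : String := "HELLO WORLD"

def Spec_criptografia (descri__o : String) (out : String) : Prop := out = criptografia_alt descri__o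
instance (descri__o : String) (out : String) : Decidable (Spec_criptografia descri__o out) := by
  unfold Spec_criptografia; infer_instance

-- ===== CLAIM (what is proved, stated in full; the proofs are below) =====
def Claim_equal_criptografia : Prop := ∀ (descri__o : String), Dom_criptografia descri__o → Pre_criptografia descri__o → Spec_criptografia descri__o (criptografia descri__o)

-- ===== LEMMAS AND PROOFS =====

-- pairing of the value list, lone last element paired with itself
def pvPairs : List Int → List (Int × Int)
  | [] => []
  | [a] => [(a, a)]
  | a :: b :: r => (a, b) :: pvPairs r

-- even/odd-position split, as A's first loop produces it
def pvSplit : List Int → List Int × List Int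
  | [] => ([], [])
  | [a] => ([a], [])
  | a :: b :: r => (a :: (pvSplit r).1, b :: (pvSplit r).2)

def pvVal (c : Char) : Int := pvAlf.getD c 0

theorem pvVal_nonneg (c : Char) : 0 ≤ pvVal c := by
  simp only [pvVal, pvAlf, PySem.Dict.getD, PySem.Dict.get?, List.find?]
  repeat' split
  all_goals simp

theorem pvMod27_bounds (a : Int) : 0 ≤ PySem.Int.mod a 27 ∧ PySem.Int.mod a 27 < 27 := by
  rw [PySem.Int.mod_eq_emod_of_pos (by omega)]
  constructor
  · exact Int.emod_nonneg a (by omega)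
  · exact Int.emod_lt_of_pos a (by omega)

-- A's first loop, from an even counter, appends the even/odd split
theorem pvSplitLemma : ∀ (chars : List Char) (cont : Int) (l1 l2 : List Int),
    PySem.Int.mod cont 2 = 0 →
    chars.foldl
      (fun (st : Int × List Int × List Int) letra =>
        let cont := st.1 + 1
        let x := pvAlf.getD letra 0
        if PySem.Int.mod cont 2 ≠ 0 then (cont, st.2.1 ++ [x], st.2.2)
        else (cont, st.2.1, st.2.2 ++ [x]))
      (cont, l1, l2)
    = (cont + chars.length, l1 ++ (pvSplit (chars.map pvVal)).1,
                            l2 ++ (pvSplit (chars.map pvVal)).2)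
  | [], cont, l1, l2, h => by simp [pvSplit]
  | [c], cont, l1, l2, h => by
    rw [PySem.Int.mod_eq_emod_of_pos (by omega)] at h
    have h1 : PySem.Int.mod (cont + 1) 2 ≠ 0 := by
      rw [PySem.Int.mod_eq_emod_of_pos (by omega)]; omega
    simp [List.foldl, pvSplit, pvVal]
    omega
  | c1 :: c2 :: rest, cont, l1, l2, h => by
    rw [PySem.Int.mod_eq_emod_of_pos (by omega)] at h
    have h1 : PySem.Int.mod (cont + 1) 2 ≠ 0 := by
      rw [PySem.Int.mod_eq_emod_of_pos (by omega)]; omega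
    have h2 : ¬ PySem.Int.mod (cont + 1 + 1) 2 ≠ 0 := by
      rw [PySem.Int.mod_eq_emod_of_pos (by omega)]; omega
    have ih := pvSplitLemma rest (cont + 1 + 1) (l1 ++ [pvVal c1]) (l2 ++ [pvVal c2])
      (by rw [PySem.Int.mod_eq_emod_of_pos (by omega)]; omega)
    simp only [List.foldl, h1, h2, if_false, ite_not, pvVal] at ih ⊢
    rw [ih]
    simp [pvSplit, pvVal, List.append_assoc]
    omega
  termination_by chars => chars.length

theorem pvPadFst : ∀ xs : List Int, (pvSplit xs).1 = (pvPairs xs).map Prod.fst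
  | [] => by simp [pvSplit, pvPairs]
  | [a] => by simp [pvSplit, pvPairs]
  | a :: b :: r => by simp [pvSplit, pvPairs, pvPadFst r]
  termination_by xs => xs.length

theorem pvPadSnd : ∀ xs : List Int,
    (if (pvSplit xs).2.length < (pvSplit xs).1.length
     then (pvSplit xs).2 ++ [(pvSplit xs).1.getD ((pvSplit xs).1.length - 1) 0]
     else (pvSplit xs).2) = (pvPairs xs).map Prod.snd
  | [] => by simp [pvSplit, pvPairs]
  | [a] => by simp [pvSplit, pvPairs]
  | a :: b :: r => by
    have ih := pvPadSnd r
    by_cases hc : (pvSplit r).2.length < (pvSplit r).1.length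
    · obtain ⟨x, e, he⟩ : ∃ x e, (pvSplit r).1 = x :: e := by
        cases h : (pvSplit r).1 with
        | nil => rw [h] at hc; simp at hc
        | cons x e => exact ⟨x, e, rfl⟩
      rw [if_pos hc] at ih
      simp only [pvSplit, pvPairs, List.length_cons, List.map_cons]
      rw [if_pos (by simpa using hc)]
      simp only [he, List.length_cons, Nat.add_sub_cancel, List.getD_cons_succ] at ih ⊢
      rw [List.cons_append, ih]
    · rw [if_neg hc] at ih
      simp only [pvSplit, pvPairs, List.length_cons, List.map_cons]
      rw [if_neg (by simpa using hc)]
      rw [ih]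
  termination_by xs => xs.length

-- index-map over range = map over the pair list
theorem pvRangeMap (f : Int → Int → Int) : ∀ (P : List (Int × Int)),
    (List.range P.length).map
      (fun i => f ((P.map Prod.fst).getD i 0) ((P.map Prod.snd).getD i 0))
    = P.map (fun p => f p.1 p.2) := by
  intro P
  induction P with
  | nil => simp
  | cons p P ih =>
    simp only [List.length_cons, List.range_succ_eq_map, List.map_cons, List.map_map]
    simp only [List.getD_cons_zero]
    exact congrArg _ ih

-- the conditional mod pass is an unconditional mod on nonneg entries
theorem pvModMap (g : Int × Int → Int) (hg : ∀ p : Int × Int, 0 ≤ p.1 → 0 ≤ p.2 → 0 ≤ g p) :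
    ∀ (P : List (Int × Int)), (∀ p ∈ P, 0 ≤ p.1 ∧ 0 ≤ p.2) →
    (P.map g).map (fun n => if n ≥ 27 then PySem.Int.mod n 27 else n)
    = P.map (fun p => PySem.Int.mod (g p) 27) := by
  intro P hP
  rw [List.map_map]
  apply List.map_congr_left
  intro p hp
  have h0 : 0 ≤ g p := hg p (hP p hp).1 (hP p hp).2
  by_cases h : g p ≥ 27
  · simp [Function.comp, h]
  · have heq : PySem.Int.mod (g p) 27 = g p := by
      rw [PySem.Int.mod_eq_emod_of_pos (by omega)]
      exact Int.emod_eq_of_lt h0 (by omega)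
    simp only [Function.comp, if_neg h, heq]

-- the interleaving loop = flatMap of two-element blocks
theorem pvInterleave (g1 g2 : Int × Int → Int) :
    ∀ (P : List (Int × Int)) (acc : List Int),
    (List.range P.length).foldl
      (fun acc i => acc ++ [(P.map g1).getD i 0, (P.map g2).getD i 0]) acc
    = acc ++ P.flatMap (fun p => [g1 p, g2 p]) := by
  intro P
  induction P with
  | nil => simp
  | cons p P ih =>
    intro acc
    simp only [List.length_cons, List.range_succ_eq_map, List.foldl_cons, List.foldl_map,
      List.getD_cons_zero, List.getD_cons_succ, List.map_cons]
    rw [ih]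
    simp

def pvG1 (p : Int × Int) : Int := PySem.Int.mod (4 * p.1 + 3 * p.2) 27
def pvG2 (p : Int × Int) : Int := PySem.Int.mod (1 * p.1 + 2 * p.2) 27

-- one reverse-lookup scan of the dict appends exactly the inverse-table character
theorem pvLookup (v : Int) (hv0 : 0 ≤ v) (hv : v < 27) (acc : String) :
    pvAlf.items.foldl (fun acc2 kv => if kv.2 == v then acc2.push kv.1 else acc2) acc
    = acc.push (pvInv.getD v ' ') := by
  interval_cases v <;> rfl

theorem pvStringFold : ∀ (sil : List Int), (∀ v ∈ sil, 0 ≤ v ∧ v < 27) →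
    ∀ (accL : List Char),
    sil.foldl (fun acc valor =>
      pvAlf.items.foldl (fun acc2 kv => if kv.2 == valor then acc2.push kv.1 else acc2) acc)
      (String.ofList accL)
    = String.ofList (accL ++ sil.map (fun v => pvInv.getD v ' ')) := by
  intro sil
  induction sil with
  | nil => intro _ accL; simp
  | cons v sil ih =>
    intro hb accL
    simp only [List.foldl_cons]
    rw [pvLookup v (hb v (by simp)).1 (hb v (by simp)).2]
    rw [show (String.ofList accL).push (pvInv.getD v ' ')
        = String.ofList (accL ++ [pvInv.getD v ' ']) from by
      apply String.toList_inj.mp; simp]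
    rw [ih (fun w hw => hb w (by simp [hw])) (accL ++ [pvInv.getD v ' '])]
    simp

theorem pvGoB_eq : ∀ chars : List Char,
    pvGoB chars = (pvPairs (chars.map pvVal)).flatMap
      (fun p => [pvInv.getD (pvG1 p) ' ', pvInv.getD (pvG2 p) ' '])
  | [] => by simp [pvGoB, pvPairs]
  | [c] => by
    simp [pvGoB, pvPairs, pvEncPair, pvG1, pvG2, pvVal]
  | c1 :: c2 :: rest => by
    simp [pvGoB, pvPairs, pvEncPair, pvG1, pvG2, pvVal, pvGoB_eq rest]
  termination_by chars => chars.length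

theorem pvPairsBounds : ∀ xs : List Int, (∀ x ∈ xs, 0 ≤ x) →
    ∀ p ∈ pvPairs xs, 0 ≤ p.1 ∧ 0 ≤ p.2
  | [], _, p, hp => by simp [pvPairs] at hp
  | [a], h, p, hp => by
    simp [pvPairs] at hp
    subst hp; exact ⟨h a (by simp), h a (by simp)⟩
  | a :: b :: r, h, p, hp => by
    simp only [pvPairs, List.mem_cons] at hp
    rcases hp with hp | hp
    · subst hp; exact ⟨h a (by simp), h b (by simp)⟩
    · exact pvPairsBounds r (fun x hx => h x (by simp [hx])) p hp
  termination_by xs => xs.length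

-- ===== VERDICT (by name: the statement is the Claim_ definition above) =====
theorem criptografia_spec : Claim_equal_criptografia := by
  unfold Claim_equal_criptografia Spec_criptografia
  intro s _ _
  unfold criptografia criptografia_alt
  simp only []
  have hsplit := pvSplitLemma s.toList 0 [] [] (by rfl)
  rw [hsplit]
  simp only [List.nil_append]
  rw [pvPadSnd (s.toList.map pvVal), pvPadFst (s.toList.map pvVal)]
  simp only [List.length_map]
  rw [pvRangeMap (fun a b => 4 * a + 3 * b) (pvPairs (s.toList.map pvVal)),
      pvRangeMap (fun a b => 1 * a + 2 * b) (pvPairs (s.toList.map pvVal))]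
  have hPb : ∀ p ∈ pvPairs (s.toList.map pvVal), 0 ≤ p.1 ∧ 0 ≤ p.2 := by
    apply pvPairsBounds
    intro x hx
    simp only [List.mem_map] at hx
    obtain ⟨c, _, rfl⟩ := hx
    exact pvVal_nonneg c
  rw [pvModMap (fun p => 4 * p.1 + 3 * p.2) (fun p h1 h2 => by simp only; omega) _ hPb,
      pvModMap (fun p => 1 * p.1 + 2 * p.2) (fun p h1 h2 => by simp only; omega) _ hPb]
  simp only [List.length_range,
    show (fun p : Int × Int => PySem.Int.mod (4 * p.1 + 3 * p.2) 27) = pvG1 from rfl,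
    show (fun p : Int × Int => PySem.Int.mod (1 * p.1 + 2 * p.2) 27) = pvG2 from rfl]
  rw [pvInterleave pvG1 pvG2 (pvPairs (s.toList.map pvVal)) []]
  simp only [List.nil_append]
  have hbounds : ∀ v ∈ (pvPairs (s.toList.map pvVal)).flatMap (fun p => [pvG1 p, pvG2 p]),
      0 ≤ v ∧ v < 27 := by
    intro v hv
    simp only [List.mem_flatMap, List.mem_cons] at hv
    obtain ⟨p, _, hv | hv | hv⟩ := hv
    · subst hv; exact pvMod27_bounds _
    · subst hv; exact pvMod27_bounds _
    · simp at hv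
  rw [show ("" : String) = String.ofList [] from rfl]
  rw [pvStringFold _ hbounds []]
  rw [pvGoB_eq s.toList]
  simp only [List.nil_append, List.map_flatMap]
  rfl
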